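-- pv_equiv track=rewrite | github.com/fresvel/TFM_MIAR | Recursos/SRL/síntesis/python/d2_phase1.py | build_synthesis_note_risk
-- ===== SOURCE A (Python) =====
-- def map_risk_token(token: str) -> str:
--     mapping = {
--         "Other:PM2.5_Forecast_Only": "Prediction_Based_Risk",
--         "Other:Threshold_Based_Environment_Quality": "AQI_Thresholds",
--         "Other:OR_Risk_Group_0_to_13": "Custom_Risk_Scale",
--         "LoP_m-AQI": "Custom_Risk_Scale",
--     }
--     return mapping.get(token, token)
--
-- def build_synthesis_note_risk(tokens_raw: list[str], tokens_norm: list[str]) -> str: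
--     variant_tokens = [t for t in tokens_raw if t != map_risk_token(t)]
--     variant_tokens = list(dict.fromkeys(variant_tokens))
--     if not variant_tokens:
--         return ""
--
--     parts: list[str] = []
--     for token in variant_tokens:
--         if token == "Other:PM2.5_Forecast_Only":
--             parts.append("Other:PM2.5_Forecast_Only se integra en Prediction_Based_Risk")
--         elif token == "Other:Threshold_Based_Environment_Quality":
--             parts.append("Other:Threshold_Based_Environment_Quality se integra en AQI_Thresholds")
--         elif token == "Other:OR_Risk_Group_0_to_13":
--             parts.append("Other:OR_Risk_Group_0_to_13 se integra en Custom_Risk_Scale")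
--         elif token == "LoP_m-AQI":
--             parts.append("LoP_m-AQI se integra en Custom_Risk_Scale")
--     return "; ".join(parts)
-- ===== SOURCE B (Python) =====
-- def map_risk_token(token: str) -> str:
--     mapping = {
--         "Other:PM2.5_Forecast_Only": "Prediction_Based_Risk",
--         "Other:Threshold_Based_Environment_Quality": "AQI_Thresholds",
--         "Other:OR_Risk_Group_0_to_13": "Custom_Risk_Scale",
--         "LoP_m-AQI": "Custom_Risk_Scale",
--     }
--     return mapping.get(token, token)
--
-- def build_synthesis_note_risk(tokens_raw: list[str], tokens_norm: list[str]) -> str: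
--     seen = set()
--     parts = []
--     for token in tokens_raw:
--         m = map_risk_token(token)
--         if m != token and token not in seen:
--             seen.add(token)
--             parts.append(f"{token} se integra en {m}")
--     return "; ".join(parts)
-- ===== Notes on version B (the rewrite author's own statement) =====
-- stated objective: simpler
-- what changed: Fuses A's three passes (filter variant tokens, dict.fromkeys dedup, per-token if/elif message dispatch) into a single traversal that keeps a seen-set and builds each message directly from the reused map_risk_token, dropping the explicit empty guard since joining an empty list already yields "".
import Mathlib
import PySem

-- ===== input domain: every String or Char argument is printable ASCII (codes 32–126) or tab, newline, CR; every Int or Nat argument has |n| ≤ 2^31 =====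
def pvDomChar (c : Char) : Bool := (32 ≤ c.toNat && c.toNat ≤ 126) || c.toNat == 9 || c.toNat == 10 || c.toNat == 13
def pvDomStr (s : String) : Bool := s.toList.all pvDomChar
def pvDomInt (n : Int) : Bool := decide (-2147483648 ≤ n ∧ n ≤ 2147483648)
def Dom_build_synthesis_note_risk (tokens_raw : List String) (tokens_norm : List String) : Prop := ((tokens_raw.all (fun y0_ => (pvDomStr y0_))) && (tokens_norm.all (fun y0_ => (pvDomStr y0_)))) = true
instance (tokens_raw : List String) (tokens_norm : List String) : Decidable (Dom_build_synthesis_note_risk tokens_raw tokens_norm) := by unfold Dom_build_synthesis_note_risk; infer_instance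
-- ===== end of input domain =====

-- B fuses A's three passes (filter, ordered dedup, if/elif message dispatch) into one traversal
-- with a seen-set, building each message from the mapping function; objective: simpler.


-- ===== PORT A =====
def pvMappingA : PySem.Dict String String := PySem.Dict.ofList [
  ("Other:PM2.5_Forecast_Only", "Prediction_Based_Risk"),
  ("Other:Threshold_Based_Environment_Quality", "AQI_Thresholds"),
  ("Other:OR_Risk_Group_0_to_13", "Custom_Risk_Scale"),
  ("LoP_m-AQI", "Custom_Risk_Scale")]

def map_risk_token (token : String) : String := pvMappingA.getD token token

def build_synthesis_note_risk (tokens_raw : List String) (tokens_norm : List String) : String :=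
  let variant_tokens := tokens_raw.filter (fun t => t != map_risk_token t)
  let variant_tokens := PySem.List.dedup variant_tokens
  if variant_tokens.isEmpty then ""
  else
    let parts : List String := variant_tokens.foldl (fun parts token =>
      if token == "Other:PM2.5_Forecast_Only" then
        parts ++ ["Other:PM2.5_Forecast_Only se integra en Prediction_Based_Risk"]
      else if token == "Other:Threshold_Based_Environment_Quality" then
        parts ++ ["Other:Threshold_Based_Environment_Quality se integra en AQI_Thresholds"]
      else if token == "Other:OR_Risk_Group_0_to_13" then
        parts ++ ["Other:OR_Risk_Group_0_to_13 se integra en Custom_Risk_Scale"]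
      else if token == "LoP_m-AQI" then
        parts ++ ["LoP_m-AQI se integra en Custom_Risk_Scale"]
      else parts) []
    PySem.Str.join "; " parts

-- ===== PORT B =====
def pvMappingB : PySem.Dict String String := PySem.Dict.ofList [
  ("Other:PM2.5_Forecast_Only", "Prediction_Based_Risk"),
  ("Other:Threshold_Based_Environment_Quality", "AQI_Thresholds"),
  ("Other:OR_Risk_Group_0_to_13", "Custom_Risk_Scale"),
  ("LoP_m-AQI", "Custom_Risk_Scale")]

def map_risk_token_b (token : String) : String := pvMappingB.getD token token

def build_synthesis_note_risk_alt (tokens_raw : List String) (tokens_norm : List String) : String :=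
  let st := tokens_raw.foldl (fun (st : PySem.Set String × List String) token =>
      let m := map_risk_token_b token
      if m != token && !(PySem.Set.contains st.1 token) then
        (PySem.Set.add st.1 token, st.2 ++ [token ++ " se integra en " ++ m])
      else st)
    (PySem.Set.empty, [])
  PySem.Str.join "; " st.2

-- ===== PRECONDITION & SPEC =====
def Spec_build_synthesis_note_risk (tokens_raw : List String) (tokens_norm : List String) (out : String) : Prop := out = build_synthesis_note_risk_alt tokens_raw tokens_norm
instance (tokens_raw : List String) (tokens_norm : List String) (out : String) : Decidable (Spec_build_synthesis_note_risk tokens_raw tokens_norm out) := by unfold Spec_build_synthesis_note_risk; infer_instance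

-- ===== CLAIM (what is proved, stated in full; the proofs are below) =====
def Claim_equal_build_synthesis_note_risk : Prop := ∀ (tokens_raw : List String) (tokens_norm : List String), Dom_build_synthesis_note_risk tokens_raw tokens_norm → Spec_build_synthesis_note_risk tokens_raw tokens_norm (build_synthesis_note_risk tokens_raw tokens_norm)

-- ===== LEMMAS AND PROOFS =====

-- the four tokens the mapping changes
def pvKeys : List String :=
  ["Other:PM2.5_Forecast_Only", "Other:Threshold_Based_Environment_Quality",
   "Other:OR_Risk_Group_0_to_13", "LoP_m-AQI"]

-- the message B builds for a variant token
def pvMsg (t : String) : String := t ++ " se integra en " ++ map_risk_token_b t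

theorem map_b_eq_a (t : String) : map_risk_token_b t = map_risk_token t := rfl

theorem map_of_not_key (t : String) (h : t ∉ pvKeys) : map_risk_token t = t := by
  simp [pvKeys] at h
  simp [map_risk_token, pvMappingA, PySem.Dict.ofList, PySem.Dict.update,
    PySem.Dict.getD_insert, PySem.Dict.getD_empty, h.1, h.2.1, h.2.2.1, h.2.2.2]

theorem variant_iff_key (t : String) : (t != map_risk_token t) = decide (t ∈ pvKeys) := by
  by_cases h : t ∈ pvKeys
  · simp [pvKeys] at h
    rcases h with h | h | h | h <;> subst h <;> decide
  · simp [map_of_not_key t h, h]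

theorem variant_iff_key' (t : String) : (map_risk_token t != t) = decide (t ∈ pvKeys) := by
  by_cases h : t ∈ pvKeys
  · simp [pvKeys] at h
    rcases h with h | h | h | h <;> subst h <;> decide
  · simp [map_of_not_key t h, h]

-- one step of A's if/elif dispatch, on a key, appends exactly B's message
theorem stepA (acc : List String) (t : String) (ht : t ∈ pvKeys) :
    (if t == "Other:PM2.5_Forecast_Only" then
        acc ++ ["Other:PM2.5_Forecast_Only se integra en Prediction_Based_Risk"]
      else if t == "Other:Threshold_Based_Environment_Quality" then
        acc ++ ["Other:Threshold_Based_Environment_Quality se integra en AQI_Thresholds"]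
      else if t == "Other:OR_Risk_Group_0_to_13" then
        acc ++ ["Other:OR_Risk_Group_0_to_13 se integra en Custom_Risk_Scale"]
      else if t == "LoP_m-AQI" then
        acc ++ ["LoP_m-AQI se integra en Custom_Risk_Scale"]
      else acc) = acc ++ [pvMsg t] := by
  simp [pvKeys] at ht
  rcases ht with h | h | h | h <;> subst h
  · rw [show pvMsg "Other:PM2.5_Forecast_Only"
        = "Other:PM2.5_Forecast_Only se integra en Prediction_Based_Risk" from by decide]
    simp
  · rw [show pvMsg "Other:Threshold_Based_Environment_Quality"
        = "Other:Threshold_Based_Environment_Quality se integra en AQI_Thresholds" from by decide]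
    simp
  · rw [show pvMsg "Other:OR_Risk_Group_0_to_13"
        = "Other:OR_Risk_Group_0_to_13 se integra en Custom_Risk_Scale" from by decide]
    simp
  · rw [show pvMsg "LoP_m-AQI"
        = "LoP_m-AQI se integra en Custom_Risk_Scale" from by decide]
    simp

-- A's if/elif loop over a list of keys is just mapping pvMsg
theorem foldA_eq_map (l : List String) (h : ∀ t ∈ l, t ∈ pvKeys) (acc : List String) :
    l.foldl (fun parts token =>
      if token == "Other:PM2.5_Forecast_Only" then
        parts ++ ["Other:PM2.5_Forecast_Only se integra en Prediction_Based_Risk"]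
      else if token == "Other:Threshold_Based_Environment_Quality" then
        parts ++ ["Other:Threshold_Based_Environment_Quality se integra en AQI_Thresholds"]
      else if token == "Other:OR_Risk_Group_0_to_13" then
        parts ++ ["Other:OR_Risk_Group_0_to_13 se integra en Custom_Risk_Scale"]
      else if token == "LoP_m-AQI" then
        parts ++ ["LoP_m-AQI se integra en Custom_Risk_Scale"]
      else parts) acc = acc ++ l.map pvMsg := by
  induction l generalizing acc with
  | nil => simp
  | cons t l ih =>
    have ht := h t (by simp)
    have hl : ∀ s ∈ l, s ∈ pvKeys := fun s hs => h s (by simp [hs])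
    rw [List.foldl_cons, stepA acc t ht, ih hl]
    simp

-- a fold of Set.add only appends
theorem foldl_add_prefix (l : List String) (s : PySem.Set String) :
    ∃ r, l.foldl PySem.Set.add s = s ++ r := by
  induction l generalizing s with
  | nil => exact ⟨[], by simp⟩
  | cons t l ih =>
    rw [List.foldl_cons]
    by_cases hm : t ∈ s
    · rw [PySem.Set.add_of_mem hm]
      exact ih s
    · rcases ih (PySem.Set.add s t) with ⟨r, hr⟩
      refine ⟨t :: r, ?_⟩
      rw [hr, PySem.Set.add_of_not_mem hm, List.append_assoc]
      rfl

-- the single-pass loop of B, started at any (seen, parts), computes A's filter+dedup fold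
theorem foldB_eq (l : List String) (seen : PySem.Set String) (parts : List String) :
    l.foldl (fun (st : PySem.Set String × List String) token =>
      let m := map_risk_token_b token
      if m != token && !(PySem.Set.contains st.1 token) then
        (PySem.Set.add st.1 token, st.2 ++ [token ++ " se integra en " ++ m])
      else st) (seen, parts)
    = ((l.filter (fun t => t != map_risk_token t)).foldl PySem.Set.add seen,
       parts ++ (((l.filter (fun t => t != map_risk_token t)).foldl PySem.Set.add seen).drop
         seen.length).map pvMsg) := by
  induction l generalizing seen parts with
  | nil => simp
  | cons t l ih =>
    simp only [List.foldl_cons, List.filter_cons]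
    by_cases hv : t ∈ pvKeys
    · have hvb : (map_risk_token_b t != t) = true := by
        rw [map_b_eq_a, variant_iff_key']; simpa
      have hva : (t != map_risk_token t) = true := by rw [variant_iff_key]; simpa
      rw [hva, if_pos rfl]
      by_cases hm : t ∈ seen
      · have hc : PySem.Set.contains seen t = true := by simp [hm]
        have hadd : PySem.Set.add seen t = seen := PySem.Set.add_of_mem hm
        simp only [hvb, hc, Bool.not_true, Bool.and_false]
        rw [if_neg Bool.false_ne_true, List.foldl_cons, hadd]
        exact ih seen parts
      · have hc : PySem.Set.contains seen t = false := by simp [hm]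
        have hadd : PySem.Set.add seen t = seen ++ [t] := PySem.Set.add_of_not_mem hm
        simp only [hvb, hc, Bool.not_false, Bool.and_true]
        rw [if_pos (by trivial), List.foldl_cons, hadd,
          ih (seen ++ [t]) (parts ++ [t ++ " se integra en " ++ map_risk_token_b t])]
        rcases foldl_add_prefix (l.filter (fun t => t != map_risk_token t)) (seen ++ [t])
          with ⟨r, hr⟩
        refine Prod.ext rfl ?_
        simp only [hr]
        simp [pvMsg]
    · have hvb : (map_risk_token_b t != t) = false := by
        rw [map_b_eq_a, variant_iff_key']; simpa
      have hva : (t != map_risk_token t) = false := by rw [variant_iff_key]; simpa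
      rw [hva, if_neg (Bool.false_ne_true)]
      simp only [hvb, Bool.false_and]
      rw [if_neg Bool.false_ne_true]
      exact ih seen parts

-- A's empty guard is redundant: joining the empty message list is already ""
theorem if_empty_join (d : List String) :
    (if d.isEmpty then "" else PySem.Str.join "; " (d.map pvMsg))
      = PySem.Str.join "; " (d.map pvMsg) := by
  cases d with
  | nil => decide
  | cons x xs => rfl

theorem both_eq (tokens_raw tokens_norm : List String) :
    build_synthesis_note_risk tokens_raw tokens_norm
      = build_synthesis_note_risk_alt tokens_raw tokens_norm := by
  unfold build_synthesis_note_risk build_synthesis_note_risk_alt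
  rw [foldB_eq]
  simp only [PySem.Set.empty, List.length_nil, List.drop_zero, List.nil_append,
    PySem.List.dedup_eq_ofList, PySem.Set.ofList_eq_foldl]
  have hmem : ∀ t ∈ (tokens_raw.filter (fun t => t != map_risk_token t)).foldl
      PySem.Set.add [], t ∈ pvKeys := by
    intro t ht
    rw [← PySem.Set.ofList_eq_foldl, PySem.Set.mem_ofList, List.mem_filter] at ht
    have hp := ht.2
    rw [variant_iff_key] at hp
    simpa using hp
  rw [foldA_eq_map _ hmem [], List.nil_append, if_empty_join]

-- ===== VERDICT (by name: the statement is the Claim_ definition above) =====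
theorem build_synthesis_note_risk_spec : Claim_equal_build_synthesis_note_risk := by
  intro tokens_raw tokens_norm _
  unfold Spec_build_synthesis_note_risk
  exact both_eq tokens_raw tokens_norm
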